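-- pv_equiv track=rewrite | github.com/NekyuuYa/ShinBot | shinbot/core/permission.py | check_permission
-- ===== SOURCE A (Python) =====
-- def check_permission(required: str, granted: set[str]) -> bool:
--     """Check if a required permission is satisfied by a granted set.
--
--     Algorithm:
--     1. Check explicit deny: if "-{required}" or any deny wildcard matches → False
--     2. Check explicit grant: if "{required}" is in set → True
--     3. Check wildcard grants: walk up the tree, check for wildcards → True
--     4. Otherwise → False
--     """
--     # Phase 1: Check for explicit denials
--     if f"-{required}" in granted:
--         return False
--
--     # Check wildcard denials: -tools.* should deny tools.weather
--     parts = required.split(".")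
--     for i in range(len(parts)):
--         prefix = ".".join(parts[:i])
--         deny_wildcard = f"-{prefix}.*" if prefix else "-*"
--         if deny_wildcard in granted:
--             return False
--
--     # Phase 2: Check for explicit grant
--     if required in granted:
--         return True
--
--     # Phase 3: Check wildcard grants
--     # Global wildcard
--     if "*" in granted:
--         return True
--
--     # Walk up the permission tree
--     for i in range(len(parts)):
--         prefix = ".".join(parts[:i])
--         wildcard = f"{prefix}.*" if prefix else "*"
--         if wildcard in granted:
--             return True
--
--     return False
-- ===== SOURCE B (Python) =====
-- def check_permission(required: str, granted: set[str]) -> bool: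
--     """Single pass over `granted`: classify each entry as deny ('-' prefix) or
--     grant, test whether it covers `required`, then deny wins over grant."""
--     def covers(pat: str) -> bool:
--         if pat == required or pat == "*":
--             return True
--         if pat.endswith(".*"):
--             stem = pat[:-2]
--             return stem != "" and required.startswith(stem + ".")
--         return False
--     has_deny = any(e.startswith("-") and covers(e[1:]) for e in granted)
--     has_grant = any(covers(e) for e in granted)
--     return not has_deny and has_grant
-- ===== Notes on version B (the rewrite author's own statement) =====
-- stated objective: alternative
-- what changed: B replaces A's generation of every ancestor wildcard key of `required` (with separate deny/grant membership probes into the set) by a single scan over `granted` that classifies each entry as deny ('-' prefix) or grant and tests whether its pattern covers `required` (equality, '*', or a 'stem.*' whose 'stem.' prefixes required), combining two booleans at the end.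
import Mathlib
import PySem

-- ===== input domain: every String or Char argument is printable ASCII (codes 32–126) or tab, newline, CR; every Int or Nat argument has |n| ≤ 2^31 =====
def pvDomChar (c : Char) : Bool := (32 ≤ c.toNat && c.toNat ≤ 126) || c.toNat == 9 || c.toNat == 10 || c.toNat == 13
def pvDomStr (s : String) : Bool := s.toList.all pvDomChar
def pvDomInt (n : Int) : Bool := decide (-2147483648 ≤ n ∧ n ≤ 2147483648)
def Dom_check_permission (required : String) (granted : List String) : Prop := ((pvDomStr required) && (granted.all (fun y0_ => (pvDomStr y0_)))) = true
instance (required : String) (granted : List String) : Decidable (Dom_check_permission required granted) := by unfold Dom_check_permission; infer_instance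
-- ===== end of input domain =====

-- B inverts the traversal: one scan over `granted` classifying each entry (deny/grant) with a
-- pattern-coverage test, instead of generating every ancestor key of `required` and probing the
-- set (objective: alternative).

-- ===== PORT A =====
-- Port of A: strings are handled as their code-point lists (List Char, exact for Python str);
-- each `in granted` membership test becomes `g.contains`, each early-return for-loop over
-- range(len(parts)) becomes `.any` over `List.range parts.length`, same keys in the same order.
def check_permission (required : String) (granted : List String) : Bool :=
  let req := required.toList
  let g := granted.map String.toList
  if g.contains ('-' :: req) then false
  else
    let parts := PySem.Chars.splitOn req ['.']
    if (List.range parts.length).any (fun i =>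
        let pre := PySem.Chars.join ['.'] (parts.take i)
        g.contains (if pre ≠ [] then '-' :: (pre ++ ['.', '*']) else ['-', '*'])) then false
    else if g.contains req then true
    else if g.contains ['*'] then true
    else if (List.range parts.length).any (fun i =>
        let pre := PySem.Chars.join ['.'] (parts.take i)
        g.contains (if pre ≠ [] then pre ++ ['.', '*'] else ['*'])) then true
    else false

-- ===== PORT B =====
-- Source B's `covers(pat)`: pat equals required or "*", or pat = stem + ".*" with nonempty stem
-- and required.startswith(stem + ".").  pat[:-2] is PySem.Chars.slice pat none (some (-2)).
def coversPat (pat req : List Char) : Bool :=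
  if pat = req ∨ pat = ['*'] then true
  else if PySem.Chars.endswith pat ['.', '*'] then
    let stem := PySem.Chars.slice pat none (some (-2))
    decide (stem ≠ []) && PySem.Chars.startswith req (stem ++ ['.'])
  else false

def check_permission_alt (required : String) (granted : List String) : Bool :=
  let req := required.toList
  let g := granted.map String.toList
  let hasDeny := g.any (fun e => PySem.Chars.startswith e ['-'] && coversPat (e.drop 1) req)
  let hasGrant := g.any (fun e => coversPat e req)
  !hasDeny && hasGrant

-- ===== PRECONDITION & SPEC =====
def Spec_check_permission (required : String) (granted : List String) (out : Bool) : Prop := out = check_permission_alt required granted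
instance (required : String) (granted : List String) (out : Bool) : Decidable (Spec_check_permission required granted out) := by unfold Spec_check_permission; infer_instance

-- ===== CLAIM (what is proved, stated in full; the proofs are below) =====
def Claim_equal_check_permission : Prop := ∀ (required : String) (granted : List String), Dom_check_permission required granted → Spec_check_permission required granted (check_permission required granted)

-- ===== LEMMAS AND PROOFS =====

-- Reference splitter: Python's s.split(".") by structural recursion.
def splitDot : List Char → List (List Char)
  | [] => [[]]
  | c :: rest => if c = '.' then [] :: splitDot rest else (splitDot rest).modifyHead (c :: ·)

theorem splitDot_ne_nil (cs : List Char) : splitDot cs ≠ [] := by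
  cases cs with
  | nil => simp [splitDot]
  | cons c rest =>
    simp only [splitDot]
    split
    · simp
    · cases h : splitDot rest with
      | nil => exact absurd h (splitDot_ne_nil rest)
      | cons a t => simp [List.modifyHead]

theorem exists_cons_splitDot (cs : List Char) : ∃ a t, splitDot cs = a :: t := by
  cases hsp : splitDot cs with
  | nil => exact absurd hsp (splitDot_ne_nil cs)
  | cons a t => exact ⟨a, t, rfl⟩

theorem splitOn_go_eq (fuel : Nat) (l cur : List Char) (acc : List (List Char))
    (h : l.length < fuel) :
    PySem.Chars.splitOn.go ['.'] fuel l cur acc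
      = acc.reverse ++ (splitDot l).modifyHead (cur.reverse ++ ·) := by
  induction fuel generalizing l cur acc with
  | zero => omega
  | succ fuel ih =>
    cases l with
    | nil => simp [PySem.Chars.splitOn.go, splitDot]
    | cons c rest =>
      rw [PySem.Chars.splitOn.go]
      by_cases hc : c = '.'
      · subst hc
        have hpre : List.isPrefixOf ['.'] ('.' :: rest) = true := by simp [List.isPrefixOf]
        rw [if_pos hpre]
        rw [ih _ _ _ (by simpa using Nat.lt_of_succ_lt_succ h)]
        obtain ⟨a, t, ht⟩ := exists_cons_splitDot rest
        simp [splitDot, ht, List.modifyHead]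
      · have hpre : List.isPrefixOf ['.'] (c :: rest) = false := by
          simp [List.isPrefixOf]; intro hcontra; exact absurd hcontra.symm hc
        rw [if_neg (by simp [hpre])]
        rw [ih _ _ _ (by simpa using Nat.lt_of_succ_lt_succ h)]
        obtain ⟨a, t, ht⟩ := exists_cons_splitDot rest
        simp [splitDot, ht, List.modifyHead, hc]

theorem splitOn_eq_splitDot (cs : List Char) :
    PySem.Chars.splitOn cs ['.'] = splitDot cs := by
  rw [PySem.Chars.splitOn, splitOn_go_eq _ _ _ _ (by omega)]
  obtain ⟨a, t, ht⟩ := exists_cons_splitDot cs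
  simp [ht, List.modifyHead]

theorem join_cons (sep h : List Char) (t : List (List Char)) :
    PySem.Chars.join sep (h :: t) = h ++ (if t = [] then [] else sep ++ PySem.Chars.join sep t) := by
  cases t with
  | nil => simp [PySem.Chars.join_singleton]
  | cons b t' => simp [PySem.Chars.join_cons_cons]

theorem join_splitDot (cs : List Char) : PySem.Chars.join ['.'] (splitDot cs) = cs := by
  induction cs with
  | nil => simp [splitDot, PySem.Chars.join_singleton]
  | cons c rest ih =>
    obtain ⟨a, t, ht⟩ := exists_cons_splitDot rest
    by_cases hc : c = '.'
    · subst hc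
      rw [splitDot, if_pos rfl, join_cons]
      simp [splitDot_ne_nil rest, ih]
    · rw [splitDot, if_neg hc, ht, List.modifyHead]
      rw [ht, join_cons] at ih
      rw [join_cons]
      cases t with
      | nil => simpa using ih
      | cons b t' => simp_all

theorem join_append (xs ys : List (List Char)) (hx : xs ≠ []) (hy : ys ≠ []) :
    PySem.Chars.join ['.'] (xs ++ ys)
      = PySem.Chars.join ['.'] xs ++ '.' :: PySem.Chars.join ['.'] ys := by
  induction xs with
  | nil => simp at hx
  | cons a xs' ih =>
    cases xs' with
    | nil =>
      cases ys with
      | nil => simp at hy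
      | cons b ys' => simp [PySem.Chars.join_cons_cons, PySem.Chars.join_singleton]
    | cons a' xs'' =>
      have ih' := ih (by simp)
      simp only [List.cons_append] at ih' ⊢
      rw [PySem.Chars.join_cons_cons, PySem.Chars.join_cons_cons, ih']
      simp

theorem splitDot_append (a b : List Char) :
    splitDot (a ++ '.' :: b) = splitDot a ++ splitDot b := by
  induction a with
  | nil => simp [splitDot]
  | cons c a' ih =>
    by_cases hc : c = '.'
    · subst hc; simp [splitDot, ih]
    · obtain ⟨x, t, ht⟩ := exists_cons_splitDot a'
      simp only [List.cons_append, splitDot, if_neg hc, ih, ht, List.modifyHead, List.cons_append]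

theorem prefix_of_take (cs : List Char) (i : Nat) (h1 : 1 ≤ i) (h2 : i < (splitDot cs).length) :
    PySem.Chars.join ['.'] ((splitDot cs).take i) ++ '.' :: PySem.Chars.join ['.'] ((splitDot cs).drop i) = cs := by
  have htk : (splitDot cs).take i ≠ [] := by
    simp only [ne_eq, List.take_eq_nil_iff, not_or]
    exact ⟨by omega, splitDot_ne_nil cs⟩
  have hdr : (splitDot cs).drop i ≠ [] := by
    simp only [ne_eq, List.drop_eq_nil_iff]
    omega
  have := join_append _ _ htk hdr
  rw [List.take_append_drop] at this
  rw [← this, join_splitDot]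

theorem take_of_prefix (stem rest cs : List Char) (h : stem ++ '.' :: rest = cs) :
    ∃ i, 1 ≤ i ∧ i < (splitDot cs).length ∧
      PySem.Chars.join ['.'] ((splitDot cs).take i) = stem := by
  subst h
  refine ⟨(splitDot stem).length, ?_, ?_, ?_⟩
  · have h := List.length_pos_of_ne_nil (splitDot_ne_nil stem); omega
  · rw [splitDot_append]
    have h := List.length_pos_of_ne_nil (splitDot_ne_nil rest)
    simp only [List.length_append]
    omega
  · rw [splitDot_append, List.take_left, join_splitDot]

theorem slice_neg_two (l : List Char) :
    PySem.List.slice l none (some (-2)) = l.take (l.length - 2) := by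
  simp [PySem.List.slice]

-- The key A's loops generate at level i (both loops; the deny loop prepends '-').
def keyA (cs : List Char) (i : Nat) : List Char :=
  let pre := PySem.Chars.join ['.'] ((splitDot cs).take i)
  if pre ≠ [] then pre ++ ['.', '*'] else ['*']

theorem keyA_zero (cs : List Char) : keyA cs 0 = ['*'] := by
  simp [keyA, PySem.Chars.join_nil]

theorem covers_iff (p cs : List Char) :
    coversPat p cs = true ↔ (p = cs ∨ ∃ i < (splitDot cs).length, p = keyA cs i) := by
  unfold coversPat
  by_cases h1 : p = cs ∨ p = ['*']
  · rw [if_pos h1]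
    simp only [true_iff]
    rcases h1 with h | h
    · exact Or.inl h
    · exact Or.inr ⟨0, List.length_pos_of_ne_nil (splitDot_ne_nil cs), by rw [h, keyA_zero]⟩
  · rw [if_neg h1]
    by_cases h2 : PySem.Chars.endswith p ['.', '*'] = true
    · rw [if_pos h2]
      obtain ⟨q, hq⟩ := (PySem.Chars.endswith_iff p ['.', '*']).mp h2
      have hslice : PySem.Chars.slice p none (some (-2)) = q := by
        rw [PySem.Chars.slice_eq_listSlice, slice_neg_two, ← hq]
        exact List.take_left' (by subst hq; simp)
      rw [hslice]
      simp only [Bool.and_eq_true, decide_eq_true_eq, PySem.Chars.startswith_iff]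
      constructor
      · rintro ⟨hqne, hpref⟩
        obtain ⟨rest, hrest⟩ := hpref
        have hcs : q ++ '.' :: rest = cs := by simpa using hrest
        obtain ⟨i, hi1, hi2, hji⟩ := take_of_prefix q rest cs hcs
        refine Or.inr ⟨i, hi2, ?_⟩
        simp only [keyA]
        rw [hji, if_pos hqne, ← hq]
      · rintro (rfl | ⟨i, hi, rfl⟩)
        · exact absurd (Or.inl rfl) h1
        · simp only [keyA] at hq
          by_cases hpre : PySem.Chars.join ['.'] ((splitDot cs).take i) ≠ []
          · rw [if_pos hpre] at hq
            have hqe : q = PySem.Chars.join ['.'] ((splitDot cs).take i) :=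
              List.append_cancel_right hq
            refine ⟨by rw [hqe]; exact hpre, ?_⟩
            have hi1 : 1 ≤ i := by
              rcases Nat.eq_zero_or_pos i with h0 | h0
              · subst h0; simp [PySem.Chars.join_nil] at hpre
              · exact h0
            have hp := prefix_of_take cs i hi1 hi
            exact ⟨_, by rw [hqe]; simpa using hp⟩
          · exact absurd (Or.inr (by simp only [keyA]; rw [if_neg hpre])) h1
    · rw [if_neg h2]
      simp only [Bool.false_eq_true, false_iff]
      rintro (rfl | ⟨i, hi, rfl⟩)
      · exact h1 (Or.inl rfl)
      · by_cases hpre : PySem.Chars.join ['.'] ((splitDot cs).take i) ≠ []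
        · refine h2 ((PySem.Chars.endswith_iff _ _).mpr ⟨PySem.Chars.join ['.'] ((splitDot cs).take i), ?_⟩)
          simp only [keyA]
          rw [if_pos hpre]
        · exact h1 (Or.inr (by simp only [keyA]; rw [if_neg hpre]))

theorem startswith_dash (e : List Char) :
    PySem.Chars.startswith e ['-'] = true ↔ e = '-' :: e.drop 1 := by
  cases e with
  | nil => simp [PySem.Chars.startswith, List.isPrefixOf]
  | cons c x =>
    simp only [PySem.Chars.startswith, List.isPrefixOf]
    constructor
    · intro h; simp at h; simp [h.symm]
    · intro h; simp at h; simp [h]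

theorem ite_chain (d1 d2 c1 c2 c3 : Bool) :
    (if d1 then false else if d2 then false else if c1 then true else if c2 then true
     else if c3 then true else false) = (!(d1 || d2) && (c1 || c2 || c3)) := by
  cases d1 <;> cases d2 <;> cases c1 <;> cases c2 <;> cases c3 <;> rfl

-- ===== VERDICT (by name: the statement is the Claim_ definition above) =====
theorem check_permission_spec : Claim_equal_check_permission := by
  intro required granted _
  unfold Spec_check_permission
  simp only [check_permission, check_permission_alt, splitOn_eq_splitDot]
  set req := required.toList with hreq
  set g := granted.map String.toList with hg
  set n := (splitDot req).length with hn
  rw [ite_chain]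
  have hkey : ∀ i : Nat,
      (if PySem.Chars.join ['.'] ((splitDot req).take i) ≠ [] then
        PySem.Chars.join ['.'] ((splitDot req).take i) ++ ['.', '*'] else ['*']) = keyA req i :=
    fun i => rfl
  have hdkey : ∀ i : Nat,
      (if PySem.Chars.join ['.'] ((splitDot req).take i) ≠ [] then
        '-' :: (PySem.Chars.join ['.'] ((splitDot req).take i) ++ ['.', '*']) else ['-', '*'])
        = '-' :: keyA req i := by
    intro i
    by_cases hpre : PySem.Chars.join ['.'] ((splitDot req).take i) ≠ [] <;>
      simp [keyA, hpre]
  have hD : (g.contains ('-' :: req) ||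
      (List.range n).any (fun i =>
        g.contains (if PySem.Chars.join ['.'] ((splitDot req).take i) ≠ [] then
          '-' :: (PySem.Chars.join ['.'] ((splitDot req).take i) ++ ['.', '*']) else ['-', '*'])))
      = g.any (fun e => PySem.Chars.startswith e ['-'] && coversPat (e.drop 1) req) := by
    rw [Bool.eq_iff_iff]
    simp only [Bool.or_eq_true, List.any_eq_true, List.contains_iff_mem, List.mem_range, hdkey]
    constructor
    · rintro (hm | ⟨i, hi, hm⟩)
      · refine ⟨_, hm, ?_⟩
        simp only [Bool.and_eq_true]
        exact ⟨(startswith_dash _).mpr rfl, by simp [(covers_iff _ _).mpr (Or.inl rfl)]⟩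
      · refine ⟨_, hm, ?_⟩
        simp only [Bool.and_eq_true]
        exact ⟨(startswith_dash _).mpr rfl,
          by simp [(covers_iff _ _).mpr (Or.inr ⟨i, hi, rfl⟩)]⟩
    · rintro ⟨e, he, hp⟩
      rw [Bool.and_eq_true] at hp
      obtain ⟨hs, hc⟩ := hp
      have he' := (startswith_dash e).mp hs
      rcases (covers_iff _ _).mp hc with hd | ⟨i, hi, hd⟩
      · exact Or.inl (by rw [he', hd] at he; exact he)
      · exact Or.inr ⟨i, hi, by rw [he', hd] at he; exact he⟩
  have hG : ((g.contains req || g.contains ['*']) ||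
      (List.range n).any (fun i =>
        g.contains (if PySem.Chars.join ['.'] ((splitDot req).take i) ≠ [] then
          PySem.Chars.join ['.'] ((splitDot req).take i) ++ ['.', '*'] else ['*'])))
      = g.any (fun e => coversPat e req) := by
    rw [Bool.eq_iff_iff]
    simp only [Bool.or_eq_true, List.any_eq_true, List.contains_iff_mem, List.mem_range, hkey]
    constructor
    · rintro ((hm | hm) | ⟨i, hi, hm⟩)
      · exact ⟨_, hm, (covers_iff _ _).mpr (Or.inl rfl)⟩
      · exact ⟨_, hm, (covers_iff _ _).mpr
          (Or.inr ⟨0, List.length_pos_of_ne_nil (splitDot_ne_nil req), (keyA_zero req).symm⟩)⟩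
      · exact ⟨_, hm, (covers_iff _ _).mpr (Or.inr ⟨i, hi, rfl⟩)⟩
    · rintro ⟨e, he, hc⟩
      rcases (covers_iff _ _).mp hc with rfl | ⟨i, hi, rfl⟩
      · exact Or.inl (Or.inl he)
      · exact Or.inr ⟨i, hi, he⟩
  rw [hD, hG]
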